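-- pv_equiv track=rewrite | github.com/weibin666/hw-kexin | hw/哈希集合/00_神秘的符文大陆.py | get_n_times_character
-- ===== SOURCE A (Python) =====
-- from collections import Counter  # 引入Counter类用于统计字符出现次数
--
-- def get_n_times_character(n, strings):
--     """
--     获取在所有字符串中至少出现 n 次的字符，并按 ASCII 码升序排序返回
--
--     :param n: 符文需要出现的最小次数
--     :param strings: 包含多个符文卷轴的字符串列表
--     :return: 结果字符串，包含符合条件的字符，按 ASCII 码排序；若无符合条件的字符，返回 "null"
--     """
--     res = set()  # 初始化结果集合
--
--     for i, s in enumerate(strings):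
--         c = Counter(s)  # 统计当前符文卷轴中每个字符的出现次数
--         '''
--         学习！
--         '''
--         st = {k for k, v in c.items() if v >= n}  # 筛选出在当前卷轴中出现至少 n 次的字符
--
--         if i == 0:
--             res = st  # 如果是第一个卷轴，直接初始化结果集合
--         else:
--             '''
--             学习！
--             '''
--             res &= st  # 取交集，确保符文在所有卷轴中都至少出现 n 次
--
--     # 如果结果集合非空，则按 ASCII 码升序排序并拼接成字符串返回，否则返回 "null"
--     return "".join(ch for ch in sorted(res)) if res else "null"
-- ===== SOURCE B (Python) =====
-- from collections import Counter
--
-- def get_n_times_character(n, strings):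
--     # tally: for each string, vote for every char occurring >= n times in it;
--     # winners are chars voted for by all strings
--     votes = {}
--     for s in strings:
--         for ch in {k for k, v in Counter(s).items() if v >= n}:
--             votes[ch] = votes.get(ch, 0) + 1
--     winners = sorted(ch for ch, v in votes.items() if v == len(strings))
--     return "".join(winners) if winners else "null"
-- ===== Notes on version B (the rewrite author's own statement) =====
-- stated objective: alternative
-- what changed: Replaces A's i==0 special-case with a running set intersection by a single vote-tally dict (one vote per string per qualifying char) compared against len(strings) at the end.
import Mathlib
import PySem

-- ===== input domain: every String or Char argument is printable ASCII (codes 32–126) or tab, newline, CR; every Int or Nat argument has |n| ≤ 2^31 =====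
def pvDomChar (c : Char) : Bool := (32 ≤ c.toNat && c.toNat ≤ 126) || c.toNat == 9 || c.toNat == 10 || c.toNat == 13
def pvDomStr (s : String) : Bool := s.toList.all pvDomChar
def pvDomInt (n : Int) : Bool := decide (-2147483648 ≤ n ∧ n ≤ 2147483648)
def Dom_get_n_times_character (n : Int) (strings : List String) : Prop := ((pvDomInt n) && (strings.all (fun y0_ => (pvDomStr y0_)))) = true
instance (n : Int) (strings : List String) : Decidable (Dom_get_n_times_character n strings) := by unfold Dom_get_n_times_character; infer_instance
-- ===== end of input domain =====

-- B replaces A's i==0 special-case + running set intersection by a vote-tally dict compared to len(strings); same cost, no speed claim.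

-- ===== PORT A =====
-- {k for k, v in Counter(s).items() if v >= n}  (the set 'st'; a shared subexpression of both Pythons)
def pvQual (n : Int) (s : String) : PySem.Set Char :=
  PySem.Set.ofList
    (((PySem.Dict.counter s.toList).items.filter (fun p => decide (n ≤ p.2))).map (·.1))

def get_n_times_character (n : Int) (strings : List String) : String :=
  let res : PySem.Set Char :=
    (PySem.List.enumerate strings).foldl
      (fun res is =>
        if is.1 = 0 then pvQual n is.2 else PySem.Set.inter res (pvQual n is.2))
      PySem.Set.empty
  if res.isEmpty then "null"
  else String.ofList (PySem.List.sorted res (fun x => x) false)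

-- ===== PORT B =====
def get_n_times_character_alt (n : Int) (strings : List String) : String :=
  let votes : PySem.Dict Char Int :=
    strings.foldl
      (fun votes s => (pvQual n s).foldl (fun d ch => d.modify ch 0 (· + 1)) votes)
      PySem.Dict.empty
  let winners : List Char :=
    PySem.List.sorted
      ((votes.items.filter (fun p => p.2 == (strings.length : Int))).map (·.1))
      (fun x => x) false
  if winners.isEmpty then "null" else String.ofList winners

-- ===== PRECONDITION & SPEC =====
def Spec_get_n_times_character (n : Int) (strings : List String) (out : String) : Prop := out = get_n_times_character_alt n strings
instance (n : Int) (strings : List String) (out : String) : Decidable (Spec_get_n_times_character n strings out) := by unfold Spec_get_n_times_character; infer_instance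

-- ===== CLAIM (what is proved, stated in full; the proofs are below) =====
def Claim_equal_get_n_times_character : Prop := ∀ (n : Int) (strings : List String), Dom_get_n_times_character n strings → Spec_get_n_times_character n strings (get_n_times_character n strings)

-- ===== LEMMAS AND PROOFS =====

-- proof-side names for the two accumulators (definitionally A's fold and B's fold)
def pvResA (n : Int) (strings : List String) : PySem.Set Char :=
  (PySem.List.enumerate strings).foldl
    (fun res is =>
      if is.1 = 0 then pvQual n is.2 else PySem.Set.inter res (pvQual n is.2))
    PySem.Set.empty

def pvVotes (n : Int) (strings : List String) : PySem.Dict Char Int :=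
  strings.foldl
    (fun votes s => (pvQual n s).foldl (fun d ch => d.modify ch 0 (· + 1)) votes)
    PySem.Dict.empty

def pvWin (n : Int) (strings : List String) : List Char :=
  ((pvVotes n strings).items.filter (fun p => p.2 == (strings.length : Int))).map (·.1)

theorem pvQual_nodup (n : Int) (s : String) : (pvQual n s).Nodup :=
  PySem.Set.nodup_ofList _

-- A's fold over the tail (all indices ≥ 1): membership
theorem memA_tail (n : Int) (l : List String) (k : Int) (hk : 1 ≤ k)
    (res0 : PySem.Set Char) (ch : Char) :
    ch ∈ (PySem.List.enumerate l k).foldl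
      (fun res is =>
        if is.1 = 0 then pvQual n is.2 else PySem.Set.inter res (pvQual n is.2)) res0
    ↔ ch ∈ res0 ∧ ∀ s ∈ l, ch ∈ pvQual n s := by
  induction l generalizing k res0 with
  | nil => simp [PySem.List.enumerate_nil]
  | cons s t ih =>
    rw [PySem.List.enumerate_cons]
    simp only [List.foldl_cons]
    rw [if_neg (by omega : ¬ (k = 0))]
    rw [ih (k + 1) (by omega)]
    simp [PySem.Set.mem_inter]
    tauto

theorem nodupA_tail (n : Int) (l : List String) (k : Int)
    (res0 : PySem.Set Char) (h : res0.Nodup) :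
    ((PySem.List.enumerate l k).foldl
      (fun res is =>
        if is.1 = 0 then pvQual n is.2 else PySem.Set.inter res (pvQual n is.2)) res0).Nodup := by
  induction l generalizing k res0 with
  | nil => simpa [PySem.List.enumerate_nil]
  | cons s t ih =>
    rw [PySem.List.enumerate_cons]
    simp only [List.foldl_cons]
    by_cases hk0 : k = 0
    · rw [if_pos hk0]; exact ih _ _ (pvQual_nodup n s)
    · rw [if_neg hk0]; exact ih _ _ (PySem.Set.nodup_inter _ _ h)

theorem memA (n : Int) (strings : List String) (ch : Char) :
    ch ∈ pvResA n strings ↔ strings ≠ [] ∧ ∀ s ∈ strings, ch ∈ pvQual n s := by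
  cases strings with
  | nil => simp [pvResA, PySem.List.enumerate_nil, PySem.Set.empty]
  | cons s t =>
    unfold pvResA
    rw [PySem.List.enumerate_cons, List.foldl_cons]
    rw [if_pos rfl]
    rw [memA_tail n t (0 + 1) (by norm_num)]
    simp

theorem nodupA (n : Int) (strings : List String) : (pvResA n strings).Nodup := by
  cases strings with
  | nil => simp [pvResA, PySem.List.enumerate_nil, PySem.Set.empty]
  | cons s t =>
    unfold pvResA
    rw [PySem.List.enumerate_cons, List.foldl_cons]
    rw [if_pos rfl]
    exact nodupA_tail n t (0 + 1) _ (pvQual_nodup n s)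

-- B's votes dict: value at ch counts the strings in which ch qualifies
theorem votes_getD_gen (n : Int) (l : List String) (d : PySem.Dict Char Int) (ch : Char) :
    (l.foldl (fun votes s => (pvQual n s).foldl (fun d ch => d.modify ch 0 (· + 1)) votes) d).getD ch 0
    = d.getD ch 0 + (l.countP (fun s => decide (ch ∈ pvQual n s)) : Int) := by
  induction l generalizing d with
  | nil => simp
  | cons s t ih =>
    simp only [List.foldl_cons]
    rw [ih, PySem.Dict.getD_foldl_modify_add_one]
    by_cases h : ch ∈ pvQual n s
    · rw [List.count_eq_one_of_mem (pvQual_nodup n s) h]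
      rw [List.countP_cons_of_pos (by simpa using h)]
      push_cast; ring
    · rw [List.count_eq_zero_of_not_mem h]
      rw [List.countP_cons_of_neg (by simpa using h)]
      push_cast; ring

theorem votes_getD (n : Int) (strings : List String) (ch : Char) :
    (pvVotes n strings).getD ch 0 = (strings.countP (fun s => decide (ch ∈ pvQual n s)) : Int) := by
  unfold pvVotes
  rw [votes_getD_gen]
  simp

theorem votes_keys_gen (n : Int) (l : List String) (d : PySem.Dict Char Int) (ch : Char) :
    ch ∈ (l.foldl (fun votes s => (pvQual n s).foldl (fun d ch => d.modify ch 0 (· + 1)) votes) d).keys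
    ↔ ch ∈ d.keys ∨ ∃ s ∈ l, ch ∈ pvQual n s := by
  induction l generalizing d with
  | nil => simp
  | cons s t ih =>
    simp only [List.foldl_cons]
    rw [ih, PySem.Dict.keys_foldl_modify]
    simp [PySem.Set.mem_update]
    tauto

theorem votes_keys (n : Int) (strings : List String) (ch : Char) :
    ch ∈ (pvVotes n strings).keys ↔ ∃ s ∈ strings, ch ∈ pvQual n s := by
  unfold pvVotes
  rw [votes_keys_gen]
  simp

theorem votes_keys_nodup (n : Int) (strings : List String) : (pvVotes n strings).keys.Nodup := by
  unfold pvVotes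
  generalize hd : (PySem.Dict.empty : PySem.Dict Char Int) = d
  have h : d.keys.Nodup := by rw [← hd]; simp
  clear hd
  induction strings generalizing d with
  | nil => simpa
  | cons s t ih =>
    simp only [List.foldl_cons]
    apply ih
    rw [PySem.Dict.keys_foldl_modify]
    exact PySem.Set.nodup_update _ _ h

theorem mem_winnersPre (n : Int) (strings : List String) (ch : Char) :
    ch ∈ pvWin n strings ↔ strings ≠ [] ∧ ∀ s ∈ strings, ch ∈ pvQual n s := by
  have hnd := votes_keys_nodup n strings
  have hitem : ∀ v : Int, ((ch, v) ∈ (pvVotes n strings).items) ↔ (pvVotes n strings).get? ch = some v := by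
    intro v
    exact Iff.symm (PySem.Dict.get?_eq_some_iff_mem_items (pvVotes n strings) ch v hnd)
  unfold pvWin
  constructor
  · intro h
    simp only [List.mem_map, List.mem_filter] at h
    obtain ⟨p, ⟨hpmem, hpv⟩, hp1⟩ := h
    have hv : p.2 = (strings.length : Int) := by simpa using hpv
    have hpair : (ch, (strings.length : Int)) ∈ (pvVotes n strings).items := by
      rw [← hp1, ← hv]; exact hpmem
    rw [hitem] at hpair
    have hkeys : ch ∈ (pvVotes n strings).keys := by
      by_contra hc
      rw [← PySem.Dict.get?_eq_none_iff_not_mem_keys] at hc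
      rw [hc] at hpair
      simp at hpair
    have hex := (votes_keys n strings ch).mp hkeys
    have hne : strings ≠ [] := by rintro rfl; simp at hex
    refine ⟨hne, ?_⟩
    have hgetD : (pvVotes n strings).getD ch 0 = (strings.length : Int) := by
      rw [PySem.Dict.getD_eq_get?_getD, hpair]; rfl
    rw [votes_getD] at hgetD
    have hcount : strings.countP (fun s => decide (ch ∈ pvQual n s)) = strings.length := by
      exact_mod_cast hgetD
    intro s hs
    have := (List.countP_eq_length).mp hcount s hs
    simpa using this
  · rintro ⟨hne, hall⟩
    obtain ⟨s0, hs0⟩ : ∃ s0, s0 ∈ strings := by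
      cases strings with
      | nil => exact absurd rfl hne
      | cons a t => exact ⟨a, List.mem_cons_self⟩
    have hkeys : ch ∈ (pvVotes n strings).keys := by
      rw [votes_keys]; exact ⟨s0, hs0, hall s0 hs0⟩
    have hcount : strings.countP (fun s => decide (ch ∈ pvQual n s)) = strings.length :=
      List.countP_eq_length.mpr (fun s hs => by simpa using hall s hs)
    have hgetD : (pvVotes n strings).getD ch 0 = (strings.length : Int) := by
      rw [votes_getD, hcount]
    have hget : (pvVotes n strings).get? ch = some (strings.length : Int) := by
      rcases hg : (pvVotes n strings).get? ch with _ | v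
      · exfalso
        rw [PySem.Dict.get?_eq_none_iff_not_mem_keys] at hg
        exact hg hkeys
      · rw [PySem.Dict.getD_eq_get?_getD, hg] at hgetD
        simpa using hgetD
    simp only [List.mem_map, List.mem_filter]
    exact ⟨(ch, (strings.length : Int)), ⟨(hitem _).mpr hget, by simp⟩, rfl⟩

theorem nodup_winnersPre (n : Int) (strings : List String) : (pvWin n strings).Nodup := by
  have hnd := votes_keys_nodup n strings
  have hsub : (pvWin n strings).Sublist ((pvVotes n strings).items.map (·.1)) :=
    List.Sublist.map _ List.filter_sublist
  exact hsub.nodup hnd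

theorem winners_perm (n : Int) (strings : List String) :
    _root_.List.Perm (pvResA n strings) (pvWin n strings) := by
  rw [List.perm_ext_iff_of_nodup (nodupA n strings) (nodup_winnersPre n strings)]
  intro ch
  rw [memA, mem_winnersPre]

-- ===== VERDICT (by name: the statement is the Claim_ definition above) =====
theorem get_n_times_character_spec : Claim_equal_get_n_times_character := by
  intro n strings _
  unfold Spec_get_n_times_character
  have hperm := winners_perm n strings
  rw [show get_n_times_character n strings
        = (if (pvResA n strings).isEmpty then "null"
           else String.ofList (PySem.List.sorted (pvResA n strings) (fun x => x) false)) from rfl]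
  rw [show get_n_times_character_alt n strings
        = (if (PySem.List.sorted (pvWin n strings) (fun x => x) false).isEmpty then "null"
           else String.ofList (PySem.List.sorted (pvWin n strings) (fun x => x) false)) from rfl]
  have hsorted := PySem.List.sorted_eq_sorted_of_perm _ _ (fun x : Char => x) Function.injective_id hperm
  by_cases hA : pvResA n strings = []
  · have hB : pvWin n strings = [] := by
      rw [hA] at hperm
      exact (List.Perm.nil_eq hperm).symm
    rw [hA, hB]
    simp [PySem.List.sorted_eq_nil_iff]
  · have hB : pvWin n strings ≠ [] := by
      intro hB
      rw [hB] at hperm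
      exact hA (List.Perm.eq_nil hperm)
    rw [if_neg (by simpa using hA),
        if_neg (by simp [PySem.List.sorted_eq_nil_iff, hB])]
    rw [hsorted]
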